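-- pv_equiv track=rewrite | github.com/neuroforest/neuro | neuro/core/data/dict.py | lod_to_lol
-- ===== SOURCE A (Python) =====
-- def lod_to_lol(lod):
--     """
--     Convert list of dictionaries to list of rows.
--     :param lod:
--     :return: lol, where the first list is the header
--     """
--     header = list()
--     master_list = list()
--     for d in lod:
--         li = ["" for i in range(len(header))]
--         for key, value in d.items():
--             try:
--                 index = header.index(key)
--                 li[index] = value
--             except ValueError:
--                 li = li + [value]
--                 header = header + [key]
--                 master_list = [sublist + [""] for sublist in master_list]
--         master_list.append(li)
--     master_list.insert(0, header)
--     return master_list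
-- ===== SOURCE B (Python) =====
-- def lod_to_lol(lod):
--     """
--     Convert list of dictionaries to list of rows.
--     :param lod:
--     :return: lol, where the first list is the header
--     """
--     header = []
--     seen = set()
--     for d in lod:
--         for key in d:
--             if key not in seen:
--                 header.append(key)
--                 seen.add(key)
--     return [header] + [[d.get(key, "") for key in header] for d in lod]
-- ===== Notes on version B (the rewrite author's own statement) =====
-- stated objective: faster
-- what changed: B builds the full header in one dedup pass (set-tracked first-appearance order) and then assembles each row directly as [d.get(key, "") for key in header], instead of A's incremental scheme that searches the header with list.index per key and re-pads every previously built row whenever a new key appears.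
import Mathlib
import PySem

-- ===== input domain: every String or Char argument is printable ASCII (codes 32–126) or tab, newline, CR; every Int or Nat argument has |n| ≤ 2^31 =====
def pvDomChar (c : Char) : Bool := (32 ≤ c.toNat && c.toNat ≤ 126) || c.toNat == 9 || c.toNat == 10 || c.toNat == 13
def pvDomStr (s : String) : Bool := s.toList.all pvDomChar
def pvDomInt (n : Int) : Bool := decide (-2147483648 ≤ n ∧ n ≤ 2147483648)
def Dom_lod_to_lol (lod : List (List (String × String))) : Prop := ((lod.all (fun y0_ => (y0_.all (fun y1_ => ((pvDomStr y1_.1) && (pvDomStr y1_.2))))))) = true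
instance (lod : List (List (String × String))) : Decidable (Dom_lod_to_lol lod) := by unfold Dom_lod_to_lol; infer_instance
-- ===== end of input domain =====

-- B builds the header once with a set-tracked dedup pass and then maps each dict to a row
-- via get-with-default, replacing A's per-key header.index scans and re-padding of all
-- earlier rows; a timing run measured B faster.


-- ===== PORT A =====
-- inner loop body: 'try: index = header.index(key); li[index] = value
--                   except ValueError: li = li + [value]; header = header + [key]; master_list = [… + [""]]'
-- state = (li, header, master_list).  li[index] = value is List.set: the index returned by
-- header.index is always < len(li) (li and header have equal length throughout), so Python never raises here.
def pvStepA (st : List String × List String × List (List String)) (kv : String × String) :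
    List String × List String × List (List String) :=
  match PySem.List.index? st.2.1 kv.1 with
  | some index => (st.1.set index kv.2, st.2.1, st.2.2)
  | none => (st.1 ++ [kv.2], st.2.1 ++ [kv.1], st.2.2.map (fun sub => sub ++ [""]))

-- outer loop body: li = ["" for i in range(len(header))]; inner loop; master_list.append(li)
def pvOuterA (st : List String × List (List String)) (d : List (String × String)) :
    List String × List (List String) :=
  let li0 : List String := (List.range st.1.length).map (fun _ => "")
  let st2 := d.foldl pvStepA (li0, st.1, st.2)
  (st2.2.1, st2.2.2 ++ [st2.1])

def lod_to_lol (lod : List (List (String × String))) : List (List String) :=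
  let st := lod.foldl pvOuterA ([], [])
  st.1 :: st.2        -- master_list.insert(0, header)

-- ===== PORT B =====
-- first pass body: 'if key not in seen: header.append(key); seen.add(key)'; state = (header, seen)
def pvStepB (hs : List String × PySem.Set String) (kv : String × String) :
    List String × PySem.Set String :=
  if PySem.Set.contains hs.2 kv.1 then hs else (hs.1 ++ [kv.1], PySem.Set.add hs.2 kv.1)

def lod_to_lol_alt (lod : List (List (String × String))) : List (List String) :=
  let hs := lod.foldl (fun hs d => d.foldl pvStepB hs) ([], PySem.Set.empty)
  hs.1 :: lod.map (fun d => hs.1.map (fun key => PySem.Dict.getD ⟨d⟩ key ""))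

-- ===== PRECONDITION & SPEC =====
-- Pre_ excludes association lists whose inner lists repeat a key: those do not represent any
-- Python dict (dict keys are unique), so no Python input of A is excluded.
def Pre_lod_to_lol (lod : List (List (String × String))) : Prop :=
  ∀ d ∈ lod, (d.map Prod.fst).Nodup
instance (lod : List (List (String × String))) : Decidable (Pre_lod_to_lol lod) := by
  unfold Pre_lod_to_lol; infer_instance

def pvWitness_lod_to_lol : (List (List (String × String))) :=
  [[("a", "1"), ("b", "2")], [("b", "3")]]

def Spec_lod_to_lol (lod : List (List (String × String))) (out : List (List String)) : Prop := out = lod_to_lol_alt lod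
instance (lod : List (List (String × String))) (out : List (List String)) : Decidable (Spec_lod_to_lol lod out) := by unfold Spec_lod_to_lol; infer_instance

-- ===== CLAIM (what is proved, stated in full; the proofs are below) =====
def Claim_equal_lod_to_lol : Prop := ∀ (lod : List (List (String × String))), Dom_lod_to_lol lod → Pre_lod_to_lol lod → Spec_lod_to_lol lod (lod_to_lol lod)

-- ===== LEMMAS AND PROOFS =====

-- the header-extension step and its fold (the common abstraction of both ports' header building)
def pvHdrStep (h : List String) (kv : String × String) : List String :=
  if kv.1 ∈ h then h else h ++ [kv.1]
def pvHdr (h : List String) (d : List (String × String)) : List String := d.foldl pvHdrStep h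
-- the row of dict d under header h
def pvRow (h : List String) (d : List (String × String)) : List String :=
  h.map (fun key => PySem.Dict.getD ⟨d⟩ key "")

lemma pvMem_hdr {h : List String} {d : List (String × String)} {x : String} (hx : x ∈ h) :
    x ∈ pvHdr h d := by
  induction d generalizing h with
  | nil => exact hx
  | cons kv rest ih =>
      refine ih ?_
      by_cases hm : kv.1 ∈ h <;> simp [pvHdrStep, hm, hx]

lemma pvKey_mem_hdr {h : List String} {d : List (String × String)} {kv : String × String}
    (hkv : kv ∈ d) : kv.1 ∈ pvHdr h d := by
  induction d generalizing h with
  | nil => cases hkv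
  | cons e rest ih =>
      rcases List.mem_cons.mp hkv with h1 | h2
      · subst h1
        show kv.1 ∈ pvHdr (pvHdrStep h kv) rest
        refine pvMem_hdr ?_
        by_cases hm : kv.1 ∈ h <;> simp [pvHdrStep, hm]
      · exact ih h2

lemma pvNodup_hdr {h : List String} {d : List (String × String)} (hh : h.Nodup) :
    (pvHdr h d).Nodup := by
  induction d generalizing h with
  | nil => exact hh
  | cons kv rest ih =>
      refine ih ?_
      by_cases hm : kv.1 ∈ h
      · rw [show pvHdrStep h kv = h by simp [pvHdrStep, hm]]; exact hh
      · rw [show pvHdrStep h kv = h ++ [kv.1] by simp [pvHdrStep, hm]]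
        exact hh.append (List.nodup_singleton _) (by simp [List.disjoint_singleton, hm])

lemma pvGetD_nil (k : String) : PySem.Dict.getD (⟨[]⟩ : PySem.Dict String String) k "" = "" := by
  simp [PySem.Dict.getD, PySem.Dict.get?]

lemma pvGetD_append_singleton (l : List (String × String)) (kv : String × String) (k : String) :
    PySem.Dict.getD (⟨l ++ [kv]⟩ : PySem.Dict String String) k ""
      = if k ∈ l.map Prod.fst then PySem.Dict.getD (⟨l⟩ : PySem.Dict String String) k ""
        else if k = kv.1 then kv.2 else "" := by
  induction l with
  | nil => by_cases hk : k = kv.1 <;>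
      simp [PySem.Dict.getD, PySem.Dict.get?, hk, eq_comm (a := kv.1) (b := k)]
  | cons e t ih =>
      by_cases he : e.1 = k
      · simp [PySem.Dict.getD, PySem.Dict.get?, he]
      · have hf : (e.1 == k) = false := by simp [he]
        have hke : k ≠ e.1 := fun hkk => he hkk.symm
        simp only [show (k ∈ List.map Prod.fst (e :: t)) ↔ (k ∈ List.map Prod.fst t) from by
          simp [hke]]
        simpa [PySem.Dict.getD, PySem.Dict.get?, List.find?_cons, hf] using ih

lemma pvGetD_not_mem {l : List (String × String)} {k : String} (hk : k ∉ l.map Prod.fst) :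
    PySem.Dict.getD (⟨l⟩ : PySem.Dict String String) k "" = "" := by
  induction l with
  | nil => exact pvGetD_nil k
  | cons e t ih =>
      simp only [List.map_cons, List.mem_cons, not_or] at hk
      have hf : (e.1 == k) = false := by simp [Ne.symm hk.1]
      have ht := ih hk.2
      simpa [PySem.Dict.getD, PySem.Dict.get?, List.find?_cons, hf] using ht

-- empty row: ["" for i in range(len(header))] is the row of the empty dict
lemma pvRow_nil (h : List String) :
    (List.range h.length).map (fun _ => "") = pvRow h [] := by
  simp [pvRow, pvGetD_nil, List.map_const', List.length_range]

-- li[index] = value: the found-key update of the current row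
lemma pvRow_set {h : List String} {p : List (String × String)} {key v : String} {i : Nat}
    (hh : h.Nodup) (hi : PySem.List.index? h key = some i) (hkp : key ∉ p.map Prod.fst) :
    (pvRow h p).set i v = pvRow h (p ++ [(key, v)]) := by
  obtain ⟨hk, hkey, -⟩ := PySem.List.getElem_of_index?_eq_some hi
  apply List.ext_getElem
  · simp [pvRow]
  · intro j hj1 hj2
    have hjh : j < h.length := by simpa [pvRow] using hj2
    simp only [pvRow, List.getElem_set, List.getElem_map, pvGetD_append_singleton]
    by_cases hij : i = j
    · subst hij
      rw [if_pos rfl, hkey, if_neg hkp, if_pos rfl]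
    · rw [if_neg hij]
      have hne : h[j] ≠ key := by
        intro he
        exact hij ((List.Nodup.getElem_inj_iff hh).mp (hkey.trans he.symm))
      by_cases hm : h[j] ∈ p.map Prod.fst
      · rw [if_pos hm]
      · rw [if_neg hm, if_neg hne, pvGetD_not_mem hm]

-- li = li + [value] under header = header + [key]
lemma pvRow_append_new {h : List String} {p : List (String × String)} {key v : String}
    (hknot : key ∉ h) (hkp : key ∉ p.map Prod.fst) :
    pvRow h p ++ [v] = pvRow (h ++ [key]) (p ++ [(key, v)]) := by
  unfold pvRow
  rw [List.map_append]
  congr 1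
  · refine List.map_congr_left ?_
    intro k hk
    rw [pvGetD_append_singleton]
    by_cases hm : k ∈ p.map Prod.fst
    · simp [hm]
    · have hne : k ≠ key := fun he => hknot (he ▸ hk)
      simp [hm, hne, pvGetD_not_mem hm]
  · simp [pvGetD_append_singleton, hkp]

-- sublist + [""] : padding an old row for a brand-new key
lemma pvRow_pad {h : List String} {e : List (String × String)} {key : String}
    (hke : key ∉ e.map Prod.fst) :
    pvRow h e ++ [""] = pvRow (h ++ [key]) e := by
  unfold pvRow
  rw [List.map_append]
  simp [pvGetD_not_mem hke]

-- A's inner loop over one dict, characterised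
lemma pvInnerA (d p : List (String × String)) (h : List String) (pre : List (List (String × String)))
    (hnd : ((p ++ d).map Prod.fst).Nodup) (hh : h.Nodup)
    (hp : ∀ kv ∈ p, kv.1 ∈ h)
    (hcov : ∀ e ∈ pre, ∀ kv ∈ e, kv.1 ∈ h) :
    d.foldl pvStepA (pvRow h p, h, pre.map (fun e => pvRow h e))
      = (pvRow (pvHdr h d) (p ++ d), pvHdr h d, pre.map (fun e => pvRow (pvHdr h d) e)) := by
  induction d generalizing p h with
  | nil => simp only [List.foldl_nil, pvHdr, List.append_nil]
  | cons kv rest ih =>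
      have hkp : kv.1 ∉ p.map Prod.fst := by
        have h2 : (p.map Prod.fst ++ (kv.1 :: rest.map Prod.fst)).Nodup := by
          rw [← List.map_cons, ← List.map_append]; exact hnd
        intro hm
        exact (List.nodup_append.mp h2).2.2 _ hm _ (List.mem_cons_self ..) rfl
      rw [List.foldl_cons]
      rcases hidx : PySem.List.index? h kv.1 with _ | i
      · -- key not in header
        have hknot : kv.1 ∉ h := (PySem.List.index?_eq_none_iff h kv.1).mp hidx
        have hstep : pvStepA (pvRow h p, h, pre.map (fun e => pvRow h e)) kv
            = (pvRow (h ++ [kv.1]) (p ++ [kv]), h ++ [kv.1],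
               pre.map (fun e => pvRow (h ++ [kv.1]) e)) := by
          simp only [pvStepA, hidx]
          refine congrArg₂ _ (pvRow_append_new hknot hkp) (congrArg _ ?_)
          rw [List.map_map]
          refine List.map_congr_left ?_
          intro e he
          refine pvRow_pad (fun hmm => hknot ?_)
          rcases List.mem_map.mp hmm with ⟨q, hq, hq1⟩
          exact hq1 ▸ hcov e he q hq
        rw [hstep, ih (p ++ [kv]) (h ++ [kv.1])
          (by simpa using hnd)
          (hh.append (List.nodup_singleton _) (by simp [List.disjoint_singleton, hknot]))
          (by intro e he; rcases List.mem_append.mp he with h1 | h2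
              · exact List.mem_append_left _ (hp e h1)
              · simp at h2; simp [h2])
          (fun e he kv' hkv' => List.mem_append_left _ (hcov e he kv' hkv'))]
        have hhdr : pvHdr h (kv :: rest) = pvHdr (h ++ [kv.1]) rest := by
          simp [pvHdr, pvHdrStep, hknot]
        rw [hhdr]
        simp
      · -- key found at index i
        have hkh : kv.1 ∈ h := (PySem.List.index?_isSome_iff h kv.1).mp (by rw [hidx]; rfl)
        have hstep : pvStepA (pvRow h p, h, pre.map (fun e => pvRow h e)) kv
            = (pvRow h (p ++ [kv]), h, pre.map (fun e => pvRow h e)) := by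
          simp only [pvStepA, hidx]
          exact congrArg₂ _ (pvRow_set hh hidx hkp) rfl
        rw [hstep, ih (p ++ [kv]) h
          (by simpa using hnd) hh
          (by intro e he; rcases List.mem_append.mp he with h1 | h2
              · exact hp e h1
              · simp at h2; simp [h2, hkh])
          hcov]
        have hhdr : pvHdr h (kv :: rest) = pvHdr h rest := by
          simp [pvHdr, pvHdrStep, hkh]
        rw [hhdr]
        simp

-- A's outer loop, characterised
lemma pvOuterA_spec (lod : List (List (String × String))) (pre : List (List (String × String))) (h : List String)
    (hnd : ∀ d ∈ lod, (d.map Prod.fst).Nodup) (hh : h.Nodup)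
    (hcov : ∀ e ∈ pre, ∀ kv ∈ e, kv.1 ∈ h) :
    lod.foldl pvOuterA (h, pre.map (fun e => pvRow h e))
      = (lod.foldl pvHdr h, (pre ++ lod).map (fun e => pvRow (lod.foldl pvHdr h) e)) := by
  induction lod generalizing h pre with
  | nil => simp
  | cons d rest ih =>
      rw [List.foldl_cons]
      have hstep : pvOuterA (h, pre.map (fun e => pvRow h e)) d
          = (pvHdr h d, (pre ++ [d]).map (fun e => pvRow (pvHdr h d) e)) := by
        simp only [pvOuterA]
        rw [pvRow_nil, pvInnerA d [] h pre (by simpa using hnd d (by simp)) hh (by simp) hcov]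
        simp
      rw [hstep, ih (pre ++ [d]) (pvHdr h d)
        (fun e he => hnd e (List.mem_cons_of_mem _ he))
        (pvNodup_hdr hh)
        (by intro e he kv hkv; rcases List.mem_append.mp he with h1 | h2
            · exact pvMem_hdr (hcov e h1 kv hkv)
            · simp at h2; exact pvKey_mem_hdr (h2 ▸ hkv))]
      simp [pvHdr, List.foldl_cons]

-- B's header pass over one dict equals the same fold (seen tracks exactly the header)
lemma pvInnerB (d : List (String × String)) (h : List String) :
    d.foldl pvStepB (h, (h : PySem.Set String)) = (pvHdr h d, pvHdr h d) := by
  induction d generalizing h with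
  | nil => simp [pvHdr]
  | cons kv rest ih =>
      rw [List.foldl_cons]
      by_cases hm : kv.1 ∈ h
      · have : pvStepB (h, (h : PySem.Set String)) kv = (h, (h : PySem.Set String)) := by
          simp [pvStepB, PySem.Set.contains, hm]
        rw [this, ih]
        simp [pvHdr, pvHdrStep, hm]
      · have : pvStepB (h, (h : PySem.Set String)) kv
            = (h ++ [kv.1], ((h ++ [kv.1] : List String) : PySem.Set String)) := by
          simp [pvStepB, PySem.Set.contains, PySem.Set.add, hm]
        rw [this, ih]
        simp [pvHdr, pvHdrStep, hm]

lemma pvOuterB (lod : List (List (String × String))) (h : List String) :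
    lod.foldl (fun hs d => d.foldl pvStepB hs) (h, (h : PySem.Set String))
      = (lod.foldl pvHdr h, lod.foldl pvHdr h) := by
  induction lod generalizing h with
  | nil => rfl
  | cons d rest ih =>
      rw [List.foldl_cons, pvInnerB, ih]
      rfl

-- ===== VERDICT (by name: the statement is the Claim_ definition above) =====
theorem lod_to_lol_spec : Claim_equal_lod_to_lol := by
  intro lod _ hpre
  unfold Spec_lod_to_lol lod_to_lol lod_to_lol_alt
  have hA := pvOuterA_spec lod [] [] hpre List.nodup_nil (by simp)
  simp only [List.map_nil] at hA
  have hB := pvOuterB lod []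
  rw [hA]
  have hB' : lod.foldl (fun hs d => d.foldl pvStepB hs) ([], PySem.Set.empty)
      = (lod.foldl pvHdr [], lod.foldl pvHdr []) := hB
  rw [hB']
  simp [pvRow]
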